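-- pv_equiv track=rewrite | github.com/MeShootIn/tinkoff-exam | task_2/task_2.py | getMinDist
-- ===== SOURCE A (Python) =====
-- def getMinDist(K, N, A):
-- 	minDist = K
--
-- 	for i in range(N):
-- 		if i == N - 1:
-- 			space = K - A[N - 1] + A[0]
-- 		else:
-- 			space = A[i + 1] - A[i]
--
-- 		minDist = min(K - space, minDist)
--
-- 	return minDist
-- ===== SOURCE B (Python) =====
-- def getMinDist(K, N, A):
--     # Divide and conquer: the minimum over interior adjacent pairs of a segment
--     # splits at the midpoint into two half problems plus the junction pair;
--     # the wraparound term K - (K - A[N-1] + A[0]) simplifies to A[N-1] - A[0].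
--     if N <= 0:
--         return K
--
--     def solve(lo, hi):
--         if hi - lo < 2:
--             return K
--         mid = (lo + hi) // 2
--         return min(solve(lo, mid), K - A[mid] + A[mid - 1], solve(mid, hi))
--
--     return min(solve(0, N), A[N - 1] - A[0], K)
-- ===== Notes on version B (the rewrite author's own statement) =====
-- stated objective: alternative
-- what changed: Replaced the fused left-to-right index loop with a divide-and-conquer recursion: solve(lo,hi) splits a segment at its midpoint, combining the two halves with the junction pair, and the wraparound term is algebraically simplified to A[N-1]-A[0]; same O(n) work, O(log n) recursion depth.
import Mathlib
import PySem

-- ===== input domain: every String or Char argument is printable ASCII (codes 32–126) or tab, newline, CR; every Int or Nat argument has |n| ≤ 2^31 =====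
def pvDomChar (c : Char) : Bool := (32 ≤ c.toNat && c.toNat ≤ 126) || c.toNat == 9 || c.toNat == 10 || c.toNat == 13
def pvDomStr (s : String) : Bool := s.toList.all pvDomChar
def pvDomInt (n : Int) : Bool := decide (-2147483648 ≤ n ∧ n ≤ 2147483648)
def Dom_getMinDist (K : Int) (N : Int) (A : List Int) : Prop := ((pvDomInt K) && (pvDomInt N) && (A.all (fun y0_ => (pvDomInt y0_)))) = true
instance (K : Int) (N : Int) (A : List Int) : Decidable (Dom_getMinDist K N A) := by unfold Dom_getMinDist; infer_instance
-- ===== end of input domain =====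

-- B replaces A's fused left-to-right index loop by a divide-and-conquer recursion over
-- segments (midpoint split + junction pair), with the wraparound term simplified to
-- A[N-1]-A[0]; same O(n) work, a genuinely different traversal order (objective: alternative).


-- ===== PORT A =====
-- literal port of A: one pass over range(N), running minimum; A[i] is pyGetD (in range under Pre_)
def getMinDist (K : Int) (N : Int) (A : List Int) : Int :=
  (PySem.List.pyRange 0 N 1).foldl
    (fun minDist i =>
      let space :=
        if i = N - 1 then K - PySem.List.pyGetD A (N - 1) 0 + PySem.List.pyGetD A 0 0
        else PySem.List.pyGetD A (i + 1) 0 - PySem.List.pyGetD A i 0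
      min (K - space) minDist)
    K

-- ===== PORT B =====
-- literal port of Source B's inner 'solve': divide and conquer on the segment [lo, hi);
-- the Nat fuel (≥ hi - lo at every call) is only a structural totality guard: the
-- fuel-exhausted branch is unreachable, since each recursive segment is strictly shorter
def solveAux (K : Int) (A : List Int) : Nat → Int → Int → Int
  | 0, _, _ => K
  | fuel + 1, lo, hi =>
    if hi - lo < 2 then K
    else
      let mid := PySem.Int.floordiv (lo + hi) 2
      min (min (solveAux K A fuel lo mid)
               (K - PySem.List.pyGetD A mid 0 + PySem.List.pyGetD A (mid - 1) 0))
          (solveAux K A fuel mid hi)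

-- literal port of Source B: guard N ≤ 0, then the three-way min (Python min(a,b,c) = min(min(a,b),c))
def getMinDist_alt (K : Int) (N : Int) (A : List Int) : Int :=
  if N ≤ 0 then K
  else
    min (min (solveAux K A N.toNat 0 N)
             (PySem.List.pyGetD A (N - 1) 0 - PySem.List.pyGetD A 0 0))
        K

-- ===== PRECONDITION & SPEC =====
-- Pre_ excludes exactly the inputs where Python A raises IndexError (N exceeds len(A)).
def Pre_getMinDist (K : Int) (N : Int) (A : List Int) : Prop := N ≤ (A.length : Int)
instance (K : Int) (N : Int) (A : List Int) : Decidable (Pre_getMinDist K N A) := by unfold Pre_getMinDist; infer_instance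
def pvWitness_getMinDist : Int × Int × List Int := (10, 3, [1, 4, 8])
def Spec_getMinDist (K : Int) (N : Int) (A : List Int) (out : Int) : Prop := out = getMinDist_alt K N A
instance (K : Int) (N : Int) (A : List Int) (out : Int) : Decidable (Spec_getMinDist K N A out) := by unfold Spec_getMinDist; infer_instance

-- ===== CLAIM =====
def Claim_equal_getMinDist : Prop := ∀ (K : Int) (N : Int) (A : List Int), Dom_getMinDist K N A → Pre_getMinDist K N A → Spec_getMinDist K N A (getMinDist K N A)

-- ===== LEMMAS AND PROOFS =====

-- the min-fold over gap indices that both programs compute, in A's plain (non-wrap) form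
def gapFold (K : Int) (A : List Int) (l : List Int) : Int :=
  l.foldl (fun m i => min (K - (PySem.List.pyGetD A (i + 1) 0 - PySem.List.pyGetD A i 0)) m) K

theorem gapFold_init_le (K : Int) (A : List Int) (l : List Int) (a : Int) :
    l.foldl (fun m i => min (K - (PySem.List.pyGetD A (i + 1) 0 - PySem.List.pyGetD A i 0)) m) a ≤ a := by
  induction l generalizing a with
  | nil => simp
  | cons x xs ih => exact le_trans (ih _) (min_le_right _ _)

theorem gapFold_le (K : Int) (A : List Int) (l : List Int) : gapFold K A l ≤ K :=
  gapFold_init_le K A l K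

theorem gapFold_shift (K : Int) (A : List Int) (l : List Int) (a b : Int) :
    l.foldl (fun m i => min (K - (PySem.List.pyGetD A (i + 1) 0 - PySem.List.pyGetD A i 0)) m) (min a b)
      = min a (l.foldl (fun m i => min (K - (PySem.List.pyGetD A (i + 1) 0 - PySem.List.pyGetD A i 0)) m) b) := by
  induction l generalizing b with
  | nil => rfl
  | cons x xs ih =>
    simp only [List.foldl_cons]
    rw [show min (K - (PySem.List.pyGetD A (x + 1) 0 - PySem.List.pyGetD A x 0)) (min a b)
        = min a (min (K - (PySem.List.pyGetD A (x + 1) 0 - PySem.List.pyGetD A x 0)) b) from by omega, ih]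

theorem gapFold_append (K : Int) (A : List Int) (l₁ l₂ : List Int) :
    gapFold K A (l₁ ++ l₂) = min (gapFold K A l₁) (gapFold K A l₂) := by
  have h1 : List.foldl (fun m i => min (K - (PySem.List.pyGetD A (i + 1) 0 - PySem.List.pyGetD A i 0)) m) K l₁ ≤ K :=
    gapFold_le K A l₁
  unfold gapFold
  rw [List.foldl_append,
      show List.foldl (fun m i => min (K - (PySem.List.pyGetD A (i + 1) 0 - PySem.List.pyGetD A i 0)) m) K l₁
        = min (List.foldl (fun m i => min (K - (PySem.List.pyGetD A (i + 1) 0 - PySem.List.pyGetD A i 0)) m) K l₁) K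
        from by omega,
      gapFold_shift]
  omega

-- solveAux (with adequate fuel) computes exactly the min-fold over the gap indices [lo, hi-1)
theorem solveAux_eq (K : Int) (A : List Int) : ∀ (fuel : Nat) (lo hi : Int), (hi - lo).toNat ≤ fuel →
    solveAux K A fuel lo hi = gapFold K A (PySem.List.pyRange lo (hi - 1) 1) := by
  intro fuel
  induction fuel with
  | zero =>
    intro lo hi hn
    rw [solveAux, PySem.List.pyRange_one_eq_nil (by omega)]; rfl
  | succ fuel ih =>
    intro lo hi hn
    rw [solveAux]
    by_cases h : hi - lo < 2
    · rw [if_pos h, PySem.List.pyRange_one_eq_nil (by omega)]; rfl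
    · have hb := PySem.Int.floordiv_two_mid_bounds (lo := lo) (hi := hi) (by omega)
      have he : PySem.Int.floordiv (lo + hi) 2 = (lo + hi) / 2 :=
        PySem.Int.floordiv_eq_ediv_of_pos (by omega)
      rw [he] at hb
      simp only [if_neg h, he]
      set mid := (lo + hi) / 2
      have hlo : lo + 1 ≤ mid := by omega
      have hhi : mid + 1 ≤ hi := by omega
      rw [ih lo mid (by omega), ih mid hi (by omega),
          show PySem.List.pyRange lo (hi - 1) 1
              = (PySem.List.pyRange lo (mid - 1) 1 ++ [mid - 1]) ++ PySem.List.pyRange mid (hi - 1) 1 from by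
            rw [show PySem.List.pyRange lo (mid - 1) 1 ++ [mid - 1] = PySem.List.pyRange lo mid 1 from by
                  rw [show mid = (mid - 1) + 1 from by omega, PySem.List.pyRange_one_succ_right (by omega)]
                  simp,
                ← PySem.List.pyRange_one_append lo mid (hi - 1) (by omega) (by omega)],
          gapFold_append, gapFold_append]
      have h1 := gapFold_le K A (PySem.List.pyRange lo (mid - 1) 1)
      have hsingle : gapFold K A [mid - 1]
          = min (K - (PySem.List.pyGetD A (mid - 1 + 1) 0 - PySem.List.pyGetD A (mid - 1) 0)) K := rfl
      rw [hsingle, show mid - 1 + 1 = mid from by omega]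
      omega

-- ===== VERDICT =====
theorem getMinDist_spec : Claim_equal_getMinDist := by
  intro K N A _ _
  unfold Spec_getMinDist getMinDist getMinDist_alt
  by_cases hN : N ≤ 0
  · rw [PySem.List.pyRange_one_eq_nil (by omega), if_pos hN]; rfl
  · rw [if_neg hN,
        show PySem.List.pyRange 0 N 1 = PySem.List.pyRange 0 (N - 1) 1 ++ [N - 1] from by
          rw [show N = (N - 1) + 1 from by omega, PySem.List.pyRange_one_succ_right (by omega)]
          simp,
        List.foldl_append, List.foldl_cons, List.foldl_nil]
    have hcong : (PySem.List.pyRange 0 (N - 1) 1).foldl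
        (fun minDist i =>
          min (K - (if i = N - 1 then K - PySem.List.pyGetD A (N - 1) 0 + PySem.List.pyGetD A 0 0
            else PySem.List.pyGetD A (i + 1) 0 - PySem.List.pyGetD A i 0)) minDist) K
      = gapFold K A (PySem.List.pyRange 0 (N - 1) 1) := by
      apply PySem.List.foldl_congr_mem
      intro acc i hi
      have : i < N - 1 := (PySem.List.mem_pyRange_one.mp hi).2
      rw [if_neg (by omega)]
    rw [hcong, if_pos (rfl : N - 1 = N - 1),
        solveAux_eq K A N.toNat 0 N (by omega)]
    have h1 := gapFold_le K A (PySem.List.pyRange 0 (N - 1) 1)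
    show min (K - (K - PySem.List.pyGetD A (N - 1) 0 + PySem.List.pyGetD A 0 0))
          (gapFold K A (PySem.List.pyRange 0 (N - 1) 1))
        = min (min (gapFold K A (PySem.List.pyRange 0 (N - 1) 1))
              (PySem.List.pyGetD A (N - 1) 0 - PySem.List.pyGetD A 0 0)) K
    omega
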